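-- pv_equiv track=rewrite | github.com/PKhing/Genetic-data-encryption | src/lib/compression.py | __bwt_with_index
-- ===== SOURCE A (Python) =====
-- def __bwt_with_index(bwt):
--   no = [0] * 256
--   result = []
--   for char in bwt:
--     idx = ord(char)
--     result.append((char, no[idx]))
--     no[idx] += 1
--   return result
-- ===== SOURCE B (Python) =====
-- def __bwt_with_index(bwt):
--   chars = list(bwt)
--   return [(c, chars[:i].count(c)) for i, c in enumerate(chars)]
-- ===== Notes on version B (the rewrite author's own statement) =====
-- stated objective: simpler
-- what changed: Replaces the mutable 256-slot running-count array with a stateless comprehension: each character's rank is the count of its occurrences in the prefix before it.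
import Mathlib
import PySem

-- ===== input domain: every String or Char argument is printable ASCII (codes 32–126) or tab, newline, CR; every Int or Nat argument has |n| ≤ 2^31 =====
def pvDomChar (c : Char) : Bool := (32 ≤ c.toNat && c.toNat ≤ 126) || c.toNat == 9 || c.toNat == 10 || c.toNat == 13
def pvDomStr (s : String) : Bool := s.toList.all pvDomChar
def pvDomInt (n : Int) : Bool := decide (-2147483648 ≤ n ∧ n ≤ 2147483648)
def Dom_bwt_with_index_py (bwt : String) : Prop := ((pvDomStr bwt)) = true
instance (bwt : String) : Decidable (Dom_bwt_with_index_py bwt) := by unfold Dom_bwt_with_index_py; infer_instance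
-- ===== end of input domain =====

-- B replaces A's mutable 256-slot running-count array by a stateless comprehension
-- (rank of each character = its count in the preceding prefix); objective: simpler.

-- ===== PORT A =====
-- 'for char in bwt: idx = ord(char); result.append((char, no[idx])); no[idx] += 1'
def bwtALoop : List Char → List Int → List (String × Int) → List (String × Int)
  | [], _no, res => res
  | c :: rest, no, res =>
    let idx := c.toNat
    bwtALoop rest (no.set idx (no.getD idx 0 + 1)) (res ++ [(String.ofList [c], no.getD idx 0)])

def bwt_with_index_py (bwt : String) : List (String × Int) :=
  bwtALoop bwt.toList (List.replicate 256 0) []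

-- ===== PORT B =====
-- 'chars = list(bwt); [(c, chars[:i].count(c)) for i, c in enumerate(chars)]'
def bwt_with_index_py_alt (bwt : String) : List (String × Int) :=
  let chars := bwt.toList
  (PySem.List.enumerate chars 0).map
    (fun p => (String.ofList [p.2], ((PySem.List.slice chars none (some p.1)).count p.2 : Int)))

-- ===== PRECONDITION & SPEC =====
def Spec_bwt_with_index_py (bwt : String) (out : List (String × Int)) : Prop := out = bwt_with_index_py_alt bwt
instance (bwt : String) (out : List (String × Int)) : Decidable (Spec_bwt_with_index_py bwt out) := by unfold Spec_bwt_with_index_py; infer_instance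

-- ===== CLAIM (what is proved, stated in full; the proofs are below) =====
def Claim_equal_bwt_with_index_py : Prop := ∀ (bwt : String), Dom_bwt_with_index_py bwt → Spec_bwt_with_index_py bwt (bwt_with_index_py bwt)

-- ===== LEMMAS AND PROOFS =====

-- common recursive specification: process l with already-seen prefix p
def bwtSpec (p : List Char) : List Char → List (String × Int)
  | [] => []
  | c :: rest => (String.ofList [c], (p.count c : Int)) :: bwtSpec (p ++ [c]) rest

lemma char_toNat_inj {a b : Char} (h : a.toNat = b.toNat) : a = b := by
  apply Char.ext
  exact UInt32.toBitVec_inj.mp (BitVec.toNat_inj.mp h)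

lemma bwtALoop_eq (l : List Char) : ∀ (no : List Int) (p : List Char) (res : List (String × Int)),
    no.length = 256 → (∀ c ∈ l, c.toNat < 256) →
    (∀ c : Char, c.toNat < 256 → no.getD c.toNat 0 = (p.count c : Int)) →
    bwtALoop l no res = res ++ bwtSpec p l := by
  induction l with
  | nil => intro no p res _ _ _; simp [bwtALoop, bwtSpec]
  | cons c rest ih =>
    intro no p res hlen hdom hcnt
    have hc : c.toNat < 256 := hdom c (by simp)
    rw [bwtALoop, ih _ (p ++ [c]) _ (by simp [hlen]) (fun d hd => hdom d (by simp [hd]))]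
    · rw [bwtSpec, hcnt c hc]
      simp
    · intro d hd
      rcases eq_or_ne d.toNat c.toNat with h | h
      · have : d = c := char_toNat_inj h
        subst this
        rw [List.getD_eq_getElem?_getD, List.getElem?_set_self (by omega : d.toNat < no.length),
          Option.getD_some, hcnt d hd]
        simp [List.count_append]
      · rw [List.getD_eq_getElem?_getD, List.getElem?_set_ne (Ne.symm h)]
        rw [← List.getD_eq_getElem?_getD, hcnt d hd]
        have : ¬ (c = d) := fun he => h (by rw [he])
        simp [List.count_append, this]

lemma bwtAlt_eq (chars : List Char) : ∀ (l : List Char) (s : Nat), chars.take s ++ l = chars →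
    (PySem.List.enumerate l (s : Int)).map
      (fun p => (String.ofList [p.2], ((PySem.List.slice chars none (some p.1)).count p.2 : Int)))
    = bwtSpec (chars.take s) l := by
  intro l
  induction l with
  | nil => intro s _; simp [bwtSpec]
  | cons c rest ih =>
    intro s hs
    have hsle : s ≤ chars.length := by
      have := congrArg List.length hs
      simp at this
      omega
    have h1 : (chars.take s).length = s := by simp; omega
    have htake : chars.take s ++ [c] = chars.take (s + 1) := by
      have e1 : chars.take (s + 1) = (chars.take s ++ c :: rest).take (s + 1) := by rw [hs]
      have e2 : (chars.take s).take (s + 1) = chars.take s :=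
        List.take_of_length_le (by omega)
      rw [List.take_append, e2, h1] at e1
      simp [e1]
    rw [PySem.List.enumerate_cons, List.map_cons, bwtSpec]
    congr 1
    · simp [PySem.List.slice_to_natCast]
    · have : ((s : Int) + 1) = ((s + 1 : Nat) : Int) := by push_cast; ring
      rw [this, ih (s + 1) (by rw [← htake]; simpa using hs), ← htake]

-- ===== VERDICT (by name: the statement is the Claim_ definition above) =====
theorem bwt_with_index_py_spec : Claim_equal_bwt_with_index_py := by
  intro bwt hdom
  have hdom' : ∀ c ∈ bwt.toList, c.toNat < 256 := by
    intro c hc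
    have := List.all_eq_true.mp hdom c hc
    simp [pvDomChar] at this
    omega
  have hA : bwt_with_index_py bwt = bwtSpec [] bwt.toList := by
    rw [bwt_with_index_py, bwtALoop_eq bwt.toList (List.replicate 256 0) [] [] (by rw [List.length_replicate]) hdom'
      (by intro c hc
          rw [List.getD_eq_getElem?_getD, List.getElem?_replicate]
          split <;> simp)]
    simp
  have hB := bwtAlt_eq bwt.toList bwt.toList 0 (by simp)
  simp only [Nat.cast_zero, List.take_zero] at hB
  unfold Spec_bwt_with_index_py
  rw [hA, bwt_with_index_py_alt]
  exact hB.symm
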